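-- pv_equiv track=rewrite | github.com/pypi-data/pypi-mirror-3 | packages/bethel.silva.purge/bethel.silva.purge-1.0b.tar.gz/bethel.silva.purge-1.0b/src/bethel/silva/purge/purge.py | _convert_paths
-- ===== SOURCE A (Python) =====
-- def _convert_paths(path, mappings):
--     """Take the path [ a tuple similar to the result of getPhysicalPath(),
--        and translate it into (possibly multiple) urls based on the
--        Purging Services path mappings.
--     """
--     paths = set()
--
--     #algorithm: with a copy of the path:
--     #  1) see if there is a key in mappings with that path.
--     #  2) If there is, replace the path with each value, add to set of paths
--     #  3) Move the last path component onto a separate list (remained)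
--     #  4) check mappings for the new (now shorter) path.
--     #  5) If there are mappings, replace the path with each value
--     #     adding on the remainder, adding to the set of paths.
--     #  6) repeat steps 3-5 until there are no more path components.
--
--     pc = list(path[:])
--     remainder = []
--     while(pc):
--         #work backwards searching for all paths in the path mapping
--         path_mappings = mappings.get(tuple(pc), [])
--         for m in path_mappings:
--             if m[-1] != '/':
--                 m += '/'
--             #rewrite path for each path mapping
--             _p = m + '/'.join(remainder)
--             paths.add(_p)
--         #take the last path component off of pc, insert it into the
--         # 0 slot of the remainder
--         remainder.insert(0, pc.pop())
--
--     return paths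
-- ===== SOURCE B (Python) =====
-- def _convert_paths(path, mappings):
--     """Same translation computed from the mapping table instead of the path:
--     scan mappings once for keys that are non-empty prefixes of path, order the
--     matches by key length (longest first), then emit the rewritten urls."""
--     path = list(path)
--     matches = [kv for kv in mappings.items()
--                if kv[0] and list(kv[0]) == path[:len(kv[0])]]
--     matches.sort(key=lambda kv: len(kv[0]), reverse=True)
--     paths = set()
--     for k, vs in matches:
--         rem = '/'.join(path[len(k):])
--         for m in vs:
--             paths.add((m if m.endswith('/') else m + '/') + rem)
--     return paths
-- ===== Notes on version B (the rewrite author's own statement) =====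
-- stated objective: faster
-- what changed: Instead of walking the path backwards with mutable pc/remainder accumulators and building the '/'-joined remainder at every prefix level, B scans the mapping table once, keeps the entries whose key is a non-empty prefix of the path, sorts those matches by key length descending, and joins a remainder only for actual matches; the traversal is over the mappings, not over the path.
import Mathlib
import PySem

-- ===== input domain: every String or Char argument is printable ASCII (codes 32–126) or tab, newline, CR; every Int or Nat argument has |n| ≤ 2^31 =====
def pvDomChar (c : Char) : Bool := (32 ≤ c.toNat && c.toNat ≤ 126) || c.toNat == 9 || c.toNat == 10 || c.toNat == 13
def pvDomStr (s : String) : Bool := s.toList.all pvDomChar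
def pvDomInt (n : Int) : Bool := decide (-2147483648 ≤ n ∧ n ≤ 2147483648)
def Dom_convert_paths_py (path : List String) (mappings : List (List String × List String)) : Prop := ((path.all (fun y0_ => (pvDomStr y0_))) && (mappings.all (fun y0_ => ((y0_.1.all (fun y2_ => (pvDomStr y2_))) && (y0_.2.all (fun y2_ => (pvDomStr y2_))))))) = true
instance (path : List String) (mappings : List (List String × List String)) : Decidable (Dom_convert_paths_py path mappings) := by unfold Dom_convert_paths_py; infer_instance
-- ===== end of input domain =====

-- B traverses the MAPPING table instead of the path: it filters the dict items for keys
-- that are non-empty prefixes of the path, sorts the matches by key length descending, and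
-- joins a remainder only for actual matches where A joins at every prefix level (objective: faster).

-- ===== PORT A =====
-- 'if m[-1] != "/": m += "/"'.  Python raises IndexError when m = "" (pyGet? = none);
-- those inputs are excluded by Pre_; on them this total port appends '/'.
def pvNormA (m : String) : String :=
  if PySem.Str.pyGet? m (-1) ≠ some '/' then m ++ "/" else m

-- the 'while pc:' loop: look up pc, add the rewritten urls, pop the last component onto remainder
def pvLoopA (mappings : List (List String × List String))
    (pc remainder : List String) (paths : PySem.Set String) : PySem.Set String :=
  if h : pc = [] then paths
  else
    let path_mappings := (PySem.Dict.mk mappings).getD pc []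
    let paths' := path_mappings.foldl
      (fun s m => PySem.Set.add s (pvNormA m ++ PySem.Str.join "/" remainder)) paths
    pvLoopA mappings pc.dropLast (pc.getLast h :: remainder) paths'
termination_by pc.length
decreasing_by simp [List.length_dropLast]; exact List.length_pos_iff.mpr h

def convert_paths_py (path : List String) (mappings : List (List String × List String)) : List String :=
  pvLoopA mappings path [] PySem.Set.empty

-- ===== PORT B =====
def pvNormB (m : String) : String :=
  if PySem.Str.endswith m "/" then m else m ++ "/"

def convert_paths_py_alt (path : List String) (mappings : List (List String × List String)) : List String :=
  -- matches = [kv for kv in mappings.items() if kv[0] and list(kv[0]) == path[:len(kv[0])]]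
  let mts := ((PySem.Dict.mk mappings).items).filter
    (fun kv => !kv.1.isEmpty && (kv.1 == PySem.List.slice path none (some (kv.1.length : Int))))
  -- matches.sort(key=lambda kv: len(kv[0]), reverse=True)
  let ms := PySem.List.sorted mts (fun kv => kv.1.length) true
  ms.foldl (fun paths kv =>
      let rem := PySem.Str.join "/" (PySem.List.slice path (some (kv.1.length : Int)) none)
      kv.2.foldl (fun paths m => PySem.Set.add paths (pvNormB m ++ rem)) paths)
    PySem.Set.empty

-- ===== PRECONDITION & SPEC =====
-- Pre_ excludes (1) mappings whose association list repeats a key — such a list is not the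
-- encoding of any Python dict (dict keys are unique), so A's first-match lookup versus B's
-- items iteration disagree only on this un-Pythonic corner — and (2) the inputs on which
-- Python A raises IndexError: an empty string among the url values of a matching prefix
-- ('m[-1]' on m = "").
def Pre_convert_paths_py (path : List String) (mappings : List (List String × List String)) : Prop :=
  (mappings.map (·.1)).Nodup ∧
  ∀ i ∈ List.range path.length, "" ∉ (PySem.Dict.mk mappings).getD (path.take (i+1)) []
instance (path : List String) (mappings : List (List String × List String)) : Decidable (Pre_convert_paths_py path mappings) := by unfold Pre_convert_paths_py; infer_instance

def pvWitness_convert_paths_py : List String × (List (List String × List String)) :=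
  (["a", "b"], [(["a"], ["http://x", "y/"]), (["a", "b"], ["z"])])

def Spec_convert_paths_py (path : List String) (mappings : List (List String × List String)) (out : List String) : Prop := out = convert_paths_py_alt path mappings
instance (path : List String) (mappings : List (List String × List String)) (out : List String) : Decidable (Spec_convert_paths_py path mappings out) := by unfold Spec_convert_paths_py; infer_instance

-- ===== CLAIM (what is proved, stated in full; the proofs are below) =====
def Claim_equal_convert_paths_py : Prop := ∀ (path : List String) (mappings : List (List String × List String)), Dom_convert_paths_py path mappings → Pre_convert_paths_py path mappings → Spec_convert_paths_py path mappings (convert_paths_py path mappings)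


-- ===== LEMMAS AND PROOFS =====

-- the two trailing-slash normalisations agree on every string (on "" both return "/")
lemma pvNorm_eq (m : String) : pvNormA m = pvNormB m := by
  unfold pvNormA pvNormB
  have hlast : m.toList.getLast? = some '/' ↔ ['/'] <:+ m.toList := by
    constructor
    · intro h
      rcases m.toList.eq_nil_or_concat with he | ⟨ys, y, he⟩ <;> rw [he] at h ⊢
      · simp at h
      · simp at h; subst h; exact ⟨ys, by simp⟩
    · rintro ⟨t, ht⟩
      rw [← ht]; simp [List.getLast?_append]
  have hA : PySem.Str.pyGet? m (-1) = some '/' ↔ ['/'] <:+ m.toList := by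
    rw [PySem.Str.pyGet?_eq, PySem.Chars.pyGet?_eq_listPyGet?, PySem.List.pyGet?_neg_one]
    exact hlast
  have hend : PySem.Str.endswith m "/" = true ↔ ['/'] <:+ m.toList := by
    rw [PySem.Str.endswith_eq, PySem.Chars.endswith_iff]; rfl
  by_cases h : ['/'] <:+ m.toList
  · rw [if_neg (not_not.mpr (hA.mpr h)), if_pos (hend.mpr h)]
  · rw [if_pos (fun hc => h (hA.mp hc)), if_neg (fun hc => h (hend.mp hc))]

-- the list of urls A's loop adds, in A's order (same recursion as pvLoopA)
def pvGen (mappings : List (List String × List String)) (pc remainder : List String) : List String :=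
  if h : pc = [] then []
  else
    ((PySem.Dict.mk mappings).getD pc []).map (fun m => pvNormA m ++ PySem.Str.join "/" remainder)
      ++ pvGen mappings pc.dropLast (pc.getLast h :: remainder)
termination_by pc.length
decreasing_by simp [List.length_dropLast]; exact List.length_pos_iff.mpr h

lemma pvLoopA_eq_foldl (mappings : List (List String × List String))
    (pc remainder : List String) :
    ∀ (paths : PySem.Set String),
      pvLoopA mappings pc remainder paths
        = (pvGen mappings pc remainder).foldl PySem.Set.add paths := by
  induction pc, remainder using pvGen.induct with
  | case1 rem => intro paths; rw [pvLoopA, pvGen]; simp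
  | case2 pc rem h ih =>
    intro paths
    rw [pvLoopA, pvGen, dif_neg h, dif_neg h, List.foldl_append, ih, List.foldl_map]

lemma pvRange_neg_cons (k : Nat) :
    PySem.List.pyRange ((k : Int) + 1) 0 (-1) = ((k : Int) + 1) :: PySem.List.pyRange k 0 (-1) := by
  simp only [PySem.List.pyRange]
  norm_num
  have h2 : (if 0 < k then k else 0) = k := by split <;> omega
  rw [h2, List.range_succ_eq_map, List.map_cons, List.map_map]
  norm_num

lemma pvTake_dropLast (path : List String) (k : Nat) (h : k < path.length) :
    (path.take (k+1)).dropLast = path.take k := by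
  simp only [List.dropLast_eq_take, List.take_take, List.length_take]
  congr 1
  omega

lemma pvTake_getLast_drop (path : List String) (k : Nat) (h : k < path.length)
    (h2 : path.take (k+1) ≠ []) :
    (path.take (k+1)).getLast h2 :: path.drop (k+1) = path.drop k := by
  rw [List.drop_eq_getElem_cons h]
  congr 1
  rw [List.getLast_eq_getElem]
  simp [List.length_take, h]

-- A's generated list is the flatMap over prefix lengths, longest first
lemma pvGen_eq_flatMap (mappings : List (List String × List String)) (path : List String) :
    ∀ k, k ≤ path.length →
      pvGen mappings (path.take k) (path.drop k)
        = (PySem.List.pyRange k 0 (-1)).flatMap (fun i =>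
            ((PySem.Dict.mk mappings).getD (PySem.List.slice path none (some i)) []).map
              (fun m => pvNormA m ++ PySem.Str.join "/" (PySem.List.slice path (some i) none))) := by
  intro k
  induction k with
  | zero =>
    intro _
    rw [pvGen]
    simp [PySem.List.pyRange]
  | succ k ih =>
    intro hk
    have hklt : k < path.length := by omega
    have hne : path.take (k+1) ≠ [] := by
      simp only [ne_eq, List.take_eq_nil_iff]
      rintro (hc | hc)
      · omega
      · subst hc; simp at hklt
    rw [pvGen, dif_neg hne, pvTake_dropLast path k hklt, pvTake_getLast_drop path k hklt hne,
        ih (by omega)]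
    have hcast : ((k+1 : Nat) : Int) = (k : Int) + 1 := by push_cast; ring
    rw [hcast, pvRange_neg_cons, List.flatMap_cons]
    congr 1
    rw [← hcast, PySem.List.slice_to path (by positivity), PySem.List.slice_from path (by positivity)]
    simp

-- ---------- B side ----------

-- the matched (key, urls) pairs ordered by decreasing key length: one per prefix length
def pvYs (path : List String) (mappings : List (List String × List String)) :
    List (List String × List String) :=
  (PySem.List.pyRange path.length 0 (-1)).filterMap (fun i =>
    ((PySem.Dict.mk mappings).get? (PySem.List.slice path none (some i))).map
      (fun v => (PySem.List.slice path none (some i), v)))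

lemma pvKey_len (path : List String) (i : Int) (h0 : 0 < i) (hn : i ≤ (path.length : Int)) :
    (PySem.List.slice path none (some i)).length = i.toNat := by
  rw [PySem.List.slice_to path (le_of_lt h0), List.length_take]
  omega

lemma pvMem_pvYs (path : List String) (mappings : List (List String × List String))
    (hnd : (mappings.map (·.1)).Nodup) (kv : List String × List String) :
    kv ∈ pvYs path mappings ↔
      kv ∈ mappings.filter
        (fun kv => !kv.1.isEmpty && (kv.1 == PySem.List.slice path none (some (kv.1.length : Int)))) := by
  have hkeys : (PySem.Dict.mk mappings).keys.Nodup := hnd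
  unfold pvYs
  rw [List.mem_filterMap, List.mem_filter]
  constructor
  · rintro ⟨i, hi, hf⟩
    rw [PySem.List.mem_pyRange_neg_one] at hi
    rcases Option.map_eq_some_iff.mp hf with ⟨v, hget, hkv⟩
    subst hkv
    have hlen := pvKey_len path i hi.1 hi.2
    refine ⟨PySem.Dict.mem_items_of_get?_eq_some _ hget, ?_⟩
    simp only [Bool.and_eq_true, beq_iff_eq, Bool.not_eq_eq_eq_not, Bool.not_true,
      List.isEmpty_eq_false_iff]
    constructor
    · intro hc
      rw [hc] at hlen
      simp at hlen
      omega
    · rw [hlen]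
      have h' : ((i.toNat : Int)) = i := by omega
      rw [h']
  · rintro ⟨hmem, hp⟩
    simp only [Bool.and_eq_true, beq_iff_eq, Bool.not_eq_eq_eq_not, Bool.not_true,
      List.isEmpty_eq_false_iff] at hp
    obtain ⟨hne, hkey⟩ := hp
    have hlen : kv.1.length ≤ path.length := by
      have := congrArg List.length hkey
      rw [PySem.List.slice_to path (by positivity), List.length_take] at this
      omega
    refine ⟨(kv.1.length : Int), ?_, ?_⟩
    · rw [PySem.List.mem_pyRange_neg_one]
      have : 0 < kv.1.length := List.length_pos_iff.mpr hne
      omega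
    · rw [← hkey, Option.map_eq_some_iff]
      refine ⟨kv.2, ?_, rfl⟩
      exact ((PySem.Dict.get?_eq_some_iff_mem_items (PySem.Dict.mk mappings) kv.1 kv.2 hkeys).mpr hmem)

lemma pvPairwise_pyRange (n : Nat) :
    (PySem.List.pyRange (n : Int) 0 (-1)).Pairwise (fun a b => b < a) := by
  rw [PySem.List.pyRange_neg_one, List.pairwise_map]
  exact List.pairwise_lt_range.imp (by intro a b h; omega)

lemma pvPairwise_pvYs (path : List String) (mappings : List (List String × List String)) :
    (pvYs path mappings).Pairwise (fun a b => b.1.length < a.1.length) := by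
  unfold pvYs
  rw [List.pairwise_filterMap]
  have hb : ∀ i ∈ PySem.List.pyRange (path.length : Int) 0 (-1),
      0 < i ∧ i ≤ (path.length : Int) := by
    intro i hi; exact PySem.List.mem_pyRange_neg_one.mp hi
  refine (pvPairwise_pyRange path.length).imp_of_mem ?_
  intro a b ha hb' hlt x hx y hy
  rcases Option.map_eq_some_iff.mp hx with ⟨v, _, hxv⟩
  rcases Option.map_eq_some_iff.mp hy with ⟨w, _, hyw⟩
  subst hxv; subst hyw
  obtain ⟨ha0, han⟩ := hb a ha
  obtain ⟨hb0, hbn⟩ := hb b hb'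
  rw [pvKey_len path a ha0 han, pvKey_len path b hb0 hbn]
  omega

lemma pvSorted_eq_pvYs (path : List String) (mappings : List (List String × List String))
    (hnd : (mappings.map (·.1)).Nodup) :
    PySem.List.sorted
      (mappings.filter
        (fun kv => !kv.1.isEmpty && (kv.1 == PySem.List.slice path none (some (kv.1.length : Int)))))
      (fun kv => kv.1.length) true
      = pvYs path mappings := by
  apply PySem.List.sorted_rev_eq_of_perm_of_pairwise_gt
  · apply List.perm_of_nodup_nodup_toFinset_eq
    · have hpw := pvPairwise_pvYs path mappings
      exact hpw.imp (fun {a b} h => by intro hab; subst hab; omega)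
    · exact (List.Nodup.of_map _ hnd).filter _
    · ext kv
      simp only [List.mem_toFinset]
      exact pvMem_pvYs path mappings hnd kv
  · exact pvPairwise_pvYs path mappings

-- a fold adding g kv.1 m for every value of every pair is a fold of Set.add over the flatMap
lemma pvFoldl_nested {α β : Type} (l : List (α × List β)) (g : α × List β → β → String)
    (s : PySem.Set String) :
    l.foldl (fun s kv => kv.2.foldl (fun s m => PySem.Set.add s (g kv m)) s) s
      = (l.flatMap (fun kv => kv.2.map (g kv))).foldl PySem.Set.add s := by
  induction l generalizing s with
  | nil => rfl
  | cons kv l ih =>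
    rw [List.foldl_cons, List.flatMap_cons, List.foldl_append, ih, List.foldl_map]

-- B's flatMap over the matches equals A's flatMap over all prefix lengths
lemma pvYs_flatMap (path : List String) (mappings : List (List String × List String)) :
    ∀ (l : List Int), (∀ i ∈ l, 0 < i ∧ i ≤ (path.length : Int)) →
      ((l.filterMap (fun i =>
          ((PySem.Dict.mk mappings).get? (PySem.List.slice path none (some i))).map
            (fun v => (PySem.List.slice path none (some i), v)))).flatMap
        (fun kv => kv.2.map (fun m =>
          pvNormB m ++ PySem.Str.join "/" (PySem.List.slice path (some (kv.1.length : Int)) none))))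
      = l.flatMap (fun i =>
          ((PySem.Dict.mk mappings).getD (PySem.List.slice path none (some i)) []).map
            (fun m => pvNormB m ++ PySem.Str.join "/" (PySem.List.slice path (some i) none))) := by
  intro l
  induction l with
  | nil => intro _; rfl
  | cons i l ih =>
    intro hb
    obtain ⟨hi, hl⟩ := List.forall_mem_cons.mp hb
    rw [List.filterMap_cons, List.flatMap_cons]
    cases hget : (PySem.Dict.mk mappings).get? (PySem.List.slice path none (some i)) with
    | none =>
      rw [PySem.Dict.getD_of_get?_eq_none _ _ hget]
      simpa using ih hl
    | some v =>
      rw [Option.map_some, List.flatMap_cons,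
        PySem.Dict.getD_of_get?_eq_some _ _ hget, ih hl]
      have hlen := pvKey_len path i hi.1 hi.2
      have : ((PySem.List.slice path none (some i)).length : Int) = i := by rw [hlen]; omega
      rw [this]

-- B unfolded: fold of Set.add over the flatMap of all matching prefixes, longest first
lemma pvAlt_eq (path : List String) (mappings : List (List String × List String))
    (hnd : (mappings.map (·.1)).Nodup) :
    convert_paths_py_alt path mappings
      = ((PySem.List.pyRange (path.length : Int) 0 (-1)).flatMap (fun i =>
          ((PySem.Dict.mk mappings).getD (PySem.List.slice path none (some i)) []).map
            (fun m => pvNormB m ++ PySem.Str.join "/" (PySem.List.slice path (some i) none)))).foldl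
          PySem.Set.add PySem.Set.empty := by
  simp only [convert_paths_py_alt]
  rw [pvSorted_eq_pvYs path mappings hnd,
    pvFoldl_nested _ (fun (kv : List String × List String) (m : String) =>
      pvNormB m ++ PySem.Str.join "/" (PySem.List.slice path (some (kv.1.length : Int)) none))]
  unfold pvYs
  rw [pvYs_flatMap path mappings _ (fun i hi => PySem.List.mem_pyRange_neg_one.mp hi)]

-- ===== VERDICT (by name: the statement is the Claim_ definition above) =====
theorem convert_paths_py_spec : Claim_equal_convert_paths_py := by
  intro path mappings _ hpre
  unfold Spec_convert_paths_py convert_paths_py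
  have hgen := pvGen_eq_flatMap mappings path path.length le_rfl
  rw [List.take_length, List.drop_length] at hgen
  rw [pvLoopA_eq_foldl, hgen, funext pvNorm_eq, pvAlt_eq path mappings hpre.1]
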